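-- pv_equiv track=rewrite | github.com/anhkhoakz/TDT_Semester_5 | Design and Analysis of Algorithms/midterm/TKN/main2.py | calculate_psu
-- ===== SOURCE A (Python) =====
-- def calculate_psu(database: list, itemset: list, target_item: str) -> float:
--     """Calculate the PSU for a set and a target item."""
--     psu = 0
--     for transaction in database:
--         if target_item in transaction:
--             start_counting = False
--             item_utility = 0
--             rru = 0
--             for i in transaction:
--                 if (all(item in transaction for item in itemset)) or not itemset:
--                     if i == target_item:
--                         start_counting = True
--                         item_utility = transaction[i]
--                     elif start_counting and transaction[i] > 0:
--                         rru += transaction[i]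
--             psu += item_utility + rru
--     return psu
-- ===== SOURCE B (Python) =====
-- def calculate_psu(database: list, itemset: list, target_item: str) -> float:
--     """Calculate the PSU for a set and a target item."""
--     psu = 0
--     for transaction in database:
--         if target_item in transaction and (not itemset or all(i in transaction for i in itemset)):
--             keys = list(transaction)
--             idx = keys.index(target_item)
--             rru = sum(transaction[k] for k in keys[idx + 1:] if transaction[k] > 0)
--             psu += transaction[target_item] + rru
--     return psu
-- ===== Notes on version B (the rewrite author's own statement) =====
-- stated objective: simpler
-- what changed: A threads a start_counting flag through a pass over every key of each transaction, re-evaluating the itemset-subset guard per item; B hoists the guard to the transaction level, locates the target with keys.index, and sums the positive utilities of the suffix keys[idx+1:] directly.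
import Mathlib
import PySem

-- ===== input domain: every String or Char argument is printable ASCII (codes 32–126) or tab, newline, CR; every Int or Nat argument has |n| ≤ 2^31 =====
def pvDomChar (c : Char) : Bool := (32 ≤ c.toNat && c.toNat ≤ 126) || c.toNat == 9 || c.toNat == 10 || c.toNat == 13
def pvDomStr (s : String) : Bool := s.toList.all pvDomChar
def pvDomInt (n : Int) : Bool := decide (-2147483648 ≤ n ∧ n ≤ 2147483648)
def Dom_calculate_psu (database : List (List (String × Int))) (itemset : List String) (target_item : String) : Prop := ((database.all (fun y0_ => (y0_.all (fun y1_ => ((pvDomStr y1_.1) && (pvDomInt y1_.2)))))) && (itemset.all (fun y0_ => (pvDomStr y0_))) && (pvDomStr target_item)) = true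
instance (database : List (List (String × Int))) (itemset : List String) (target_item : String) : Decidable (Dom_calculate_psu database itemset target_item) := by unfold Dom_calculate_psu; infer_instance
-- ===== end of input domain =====

-- B (simpler decomposition, same cost): hoist A's per-item itemset guard to the transaction level, locate the target with keys.index, and sum the positive utilities of the suffix keys[idx+1:] instead of threading a start_counting flag over every key.


-- ===== PORT A =====
def pvAStep (t : PySem.Dict String Int) (itemset : List String) (target_item : String)
    (st : Bool × Int × Int) (i : String) : Bool × Int × Int :=
  if (itemset.all fun item => t.contains item) || itemset.isEmpty then
    if i == target_item then (true, t.getD i 0, st.2.2)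
    else if st.1 && decide (t.getD i 0 > 0) then (st.1, st.2.1, st.2.2 + t.getD i 0)
    else st
  else st

-- transliteration of A: dicts become PySem.Dict built from the association list;
-- transaction[i] is t.getD i 0, exact because i is always a key of t
def calculate_psu (database : List (List (String × Int))) (itemset : List String) (target_item : String) : Int :=
  database.foldl (fun psu transaction =>
    let t := PySem.Dict.ofList transaction
    if t.contains target_item then
      let s := t.keys.foldl (pvAStep t itemset target_item) (false, 0, 0)
      psu + (s.2.1 + s.2.2)
    else psu) 0

-- ===== PORT B =====
def pvBRru (t : PySem.Dict String Int) (ks : List String) : Int :=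
  ks.foldl (fun acc k => if t.getD k 0 > 0 then acc + t.getD k 0 else acc) 0

-- transliteration of B (Source B): hoisted guard, keys.index, sum over the suffix keys[idx+1:];
-- the 'none' arm is unreachable because the guard ensures target_item ∈ keys
def calculate_psu_alt (database : List (List (String × Int))) (itemset : List String) (target_item : String) : Int :=
  database.foldl (fun psu transaction =>
    let t := PySem.Dict.ofList transaction
    if t.contains target_item && (itemset.isEmpty || itemset.all fun i => t.contains i) then
      match PySem.List.index? t.keys target_item with
      | some idx =>
          psu + (t.getD target_item 0 + pvBRru t (PySem.List.slice t.keys (some ((idx : Int) + 1)) none))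
      | none => psu
    else psu) 0

-- ===== PRECONDITION & SPEC =====
def Spec_calculate_psu (database : List (List (String × Int))) (itemset : List String) (target_item : String) (out : Int) : Prop := out = calculate_psu_alt database itemset target_item
instance (database : List (List (String × Int))) (itemset : List String) (target_item : String) (out : Int) : Decidable (Spec_calculate_psu database itemset target_item out) := by unfold Spec_calculate_psu; infer_instance

-- ===== CLAIM (what is proved, stated in full; the proofs are below) =====
def Claim_equal_calculate_psu : Prop := ∀ (database : List (List (String × Int))) (itemset : List String) (target_item : String), Dom_calculate_psu database itemset target_item → Spec_calculate_psu database itemset target_item (calculate_psu database itemset target_item)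


-- ===== LEMMAS AND PROOFS =====

-- A's inner loop before the target key: the flag is down and nothing accumulates
theorem pvAStep_pre (t : PySem.Dict String Int) (itemset : List String) (target_item : String)
    (l : List String) (h : target_item ∉ l) :
    l.foldl (pvAStep t itemset target_item) (false, 0, 0) = (false, 0, 0) := by
  induction l with
  | nil => rfl
  | cons k ks ih =>
    simp only [List.mem_cons, not_or] at h
    have hk : (k == target_item) = false := by simp [Ne.symm h.1]
    have hstep : pvAStep t itemset target_item (false, 0, 0) k = (false, 0, 0) := by
      by_cases hg : ((itemset.all fun item => t.contains item) || itemset.isEmpty) = true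
      · simp [pvAStep, hg, hk]
      · simp only [pvAStep, if_neg hg]
    rw [List.foldl_cons, hstep]
    exact ih h.2

-- A's inner loop after the target key: it accumulates exactly B's suffix sum
theorem pvAStep_post (t : PySem.Dict String Int) (itemset : List String) (target_item : String)
    (u : Int)
    (hg : ((itemset.all fun item => t.contains item) || itemset.isEmpty) = true)
    (l : List String) (h : target_item ∉ l) : ∀ r : Int,
    l.foldl (pvAStep t itemset target_item) (true, u, r)
      = (true, u, l.foldl (fun acc k => if t.getD k 0 > 0 then acc + t.getD k 0 else acc) r) := by
  induction l with
  | nil => intro r; rfl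
  | cons k ks ih =>
    intro r
    simp only [List.mem_cons, not_or] at h
    have hk : (k == target_item) = false := by simp [Ne.symm h.1]
    have hstep : pvAStep t itemset target_item (true, u, r) k
        = (true, u, if t.getD k 0 > 0 then r + t.getD k 0 else r) := by
      by_cases hpos : t.getD k 0 > 0
      · simp [pvAStep, hg, hk, hpos]
      · simp [pvAStep, hg, hk, hpos]
    rw [List.foldl_cons, hstep]
    by_cases hpos : t.getD k 0 > 0
    · rw [if_pos hpos, ih h.2, List.foldl_cons, if_pos hpos]
    · rw [if_neg hpos, ih h.2, List.foldl_cons, if_neg hpos]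

-- the per-transaction bodies of A and B agree
theorem pv_tx_eq (itemset : List String) (target_item : String) (psu : Int)
    (transaction : List (String × Int)) :
    (let t := PySem.Dict.ofList transaction
     if t.contains target_item then
       let s := t.keys.foldl (pvAStep t itemset target_item) (false, 0, 0)
       psu + (s.2.1 + s.2.2)
     else psu)
    = (let t := PySem.Dict.ofList transaction
       if t.contains target_item && (itemset.isEmpty || itemset.all fun i => t.contains i) then
         match PySem.List.index? t.keys target_item with
         | some idx =>
             psu + (t.getD target_item 0
               + pvBRru t (PySem.List.slice t.keys (some ((idx : Int) + 1)) none))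
         | none => psu
       else psu) := by
  set t := PySem.Dict.ofList transaction with ht
  by_cases hc : t.contains target_item = true
  · have hmem : target_item ∈ t.keys := (PySem.Dict.contains_iff_mem_keys t target_item).mp hc
    have hnd : t.keys.Nodup := by rw [ht]; exact PySem.Dict.nodup_keys_ofList transaction
    rw [if_pos hc]
    by_cases hg : ((itemset.all fun item => t.contains item) || itemset.isEmpty) = true
    · -- guard holds in both programs
      have hg' : (t.contains target_item
          && (itemset.isEmpty || itemset.all fun i => t.contains i)) = true := by
        rcases Bool.or_eq_true_iff.mp hg with h | h <;> simp [hc, h]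
      rw [if_pos hg']
      obtain ⟨kpre, kpost, hsplit⟩ := List.append_of_mem hmem
      have hnd' := hsplit ▸ hnd
      rw [List.nodup_append] at hnd'
      have hpre : target_item ∉ kpre := fun hx => hnd'.2.2 target_item hx target_item (List.mem_cons_self) rfl
      have hpost : target_item ∉ kpost := ((List.nodup_cons.mp hnd'.2.1).1)
      have hidx : PySem.List.index? t.keys target_item = some kpre.length :=
        (PySem.List.index?_eq_some_iff t.keys target_item kpre.length).mpr
          ⟨kpre, kpost, hsplit, rfl, hpre⟩
      rw [hidx]
      have hcast : ((kpre.length : Int) + 1) = (((kpre.length + 1 : Nat) : Int)) := by push_cast; ring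
      have hdrop : t.keys.drop (kpre.length + 1) = kpost := by
        rw [hsplit, show kpre ++ target_item :: kpost = (kpre ++ [target_item]) ++ kpost by simp]
        exact List.drop_left' (by simp)
      have hslice : PySem.List.slice t.keys (some ((kpre.length : Int) + 1)) none = kpost := by
        rw [hcast, PySem.List.slice_from_natCast, hdrop]
      have hfold : t.keys.foldl (pvAStep t itemset target_item) (false, 0, 0)
          = (true, t.getD target_item 0,
             kpost.foldl (fun acc k => if t.getD k 0 > 0 then acc + t.getD k 0 else acc) 0) := by
        rw [hsplit, List.foldl_append, pvAStep_pre t itemset target_item kpre hpre,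
          List.foldl_cons]
        have hstep : pvAStep t itemset target_item (false, 0, 0) target_item
            = (true, t.getD target_item 0, 0) := by simp [pvAStep, hg]
        rw [hstep, pvAStep_post t itemset target_item _ hg kpost hpost 0]
      rw [hfold]
      simp only [pvBRru, hslice]
    · -- guard fails: A accumulates nothing, B skips
      simp only [Bool.or_eq_true, not_or, Bool.not_eq_true] at hg
      have hg' : (t.contains target_item
          && (itemset.isEmpty || itemset.all fun i => t.contains i)) = false := by
        simp [hg.1, hg.2]
      rw [if_neg (by simp [hg'])]
      have hgf : ((itemset.all fun item => t.contains item) || itemset.isEmpty) = false := by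
        simp [hg.1, hg.2]
      have hfix : t.keys.foldl (pvAStep t itemset target_item) (false, 0, 0) = (false, 0, 0) := by
        have hstep : ∀ (st : Bool × Int × Int) (k : String),
            pvAStep t itemset target_item st k = st := by
          intro st k; unfold pvAStep; rw [hgf]; simp
        induction t.keys with
        | nil => rfl
        | cons k ks ih => rw [List.foldl_cons, hstep]; exact ih
      rw [hfix]
      norm_num
  · rw [if_neg hc, if_neg (fun hb => hc (((Bool.and_eq_true _ _).mp hb).1))]

-- ===== VERDICT (by name: the statement is the Claim_ definition above) =====
theorem calculate_psu_spec : Claim_equal_calculate_psu := by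
  intro database itemset target_item _hdom
  unfold Spec_calculate_psu calculate_psu calculate_psu_alt
  congr 1
  funext psu transaction
  exact pv_tx_eq itemset target_item psu transaction
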